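-- pv_equiv track=rewrite | github.com/KPsychO/PR | practica2/sat/practica2.py | addexists
-- ===== SOURCE A (Python) =====
-- def addexists(a):
--     if len(a) == 0:
--         return "false"
--     elif len(a) == 1:
--         return a[0]
--     else :
--         x = a.pop()
--         return "(or " + x + " " + addexists(a) + " )"
-- ===== SOURCE B (Python) =====
-- def addexists(a):
--     if len(a) == 0:
--         return "false"
--     left = "".join("(or " + x + " " for x in a[:0:-1])
--     return left + a[0] + " )" * (len(a) - 1)
-- ===== Notes on version B (the rewrite author's own statement) =====
-- stated objective: faster
-- what changed: Replaced the recursion (which pops the last element, recurses, and nests + concatenations) by a single non-mutating pass: one str.join over the reversed tail builds all '(or x ' prefixes and the closing ' )' brackets come from string repetition; equivalence is about the return value only (A empties a down to one element, B does not mutate a).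
import Mathlib
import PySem

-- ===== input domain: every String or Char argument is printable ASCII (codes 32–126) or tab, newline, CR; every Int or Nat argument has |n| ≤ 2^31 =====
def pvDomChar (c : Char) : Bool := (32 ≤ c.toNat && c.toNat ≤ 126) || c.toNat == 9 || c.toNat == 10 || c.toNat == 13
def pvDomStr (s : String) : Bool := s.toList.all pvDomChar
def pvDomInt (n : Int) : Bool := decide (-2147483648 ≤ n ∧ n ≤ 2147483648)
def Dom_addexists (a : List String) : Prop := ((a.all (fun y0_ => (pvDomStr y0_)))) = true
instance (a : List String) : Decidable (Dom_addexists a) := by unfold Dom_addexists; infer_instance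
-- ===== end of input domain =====

-- B replaces A's pop-and-recurse with one non-mutating pass (join over the reversed tail plus repeated closers);
-- equivalence is about the RETURN value only: Python A empties `a` down to one element, B leaves `a` untouched.

-- ===== PORT A =====
-- a.pop() = a.getLast!; after the pop the recursive call runs on a.dropLast
def addexists (a : List String) : String :=
  if a.length == 0 then "false"
  else if a.length == 1 then a[0]!
  else
    let x := a.getLast!
    "(or " ++ x ++ " " ++ addexists a.dropLast ++ " )"
termination_by a.length
decreasing_by
  rename_i h1 h2
  simp at h1 h2
  have h := List.length_dropLast (xs := a)
  have h0 : a.length ≠ 0 := by simpa using congrArg List.length |>.mt (fun e => h1 (by simpa [List.length_eq_zero_iff] using e))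
  omega

-- ===== PORT B =====
-- a[:0:-1] is the reversed tail; " )" * (len(a)-1) is the joined replicate
def addexists_alt (a : List String) : String :=
  match a with
  | [] => "false"
  | x0 :: rest =>
    let left := String.join ((rest.reverse).map (fun x => "(or " ++ x ++ " "))
    left ++ x0 ++ String.join (List.replicate rest.length " )")

-- ===== PRECONDITION & SPEC =====
def Spec_addexists (a : List String) (out : String) : Prop := out = addexists_alt a
instance (a : List String) (out : String) : Decidable (Spec_addexists a out) := by unfold Spec_addexists; infer_instance

-- ===== CLAIM (what is proved, stated in full; the proofs are below) =====
def Claim_equal_addexists : Prop := ∀ (a : List String), Dom_addexists a → Spec_addexists a (addexists a)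

-- ===== LEMMAS AND PROOFS =====

theorem str_join_cons (x : String) (l : List String) : String.join (x :: l) = x ++ String.join l := by
  simp only [String.join, List.foldl_cons]
  induction l generalizing x with
  | nil => simp
  | cons y t ih =>
      simp only [List.foldl_cons]
      have hx : ("" ++ x ++ y) = ("" ++ (x ++ y)) := by simp
      rw [hx, ih (x ++ y), ih y, String.append_assoc]

theorem join_replicate_comm (n : Nat) (s : String) :
    String.join (List.replicate n s) ++ s = s ++ String.join (List.replicate n s) := by
  induction n with
  | zero => simp [String.join]
  | succ k ih =>
      rw [List.replicate_succ, str_join_cons, String.append_assoc, ih]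

theorem join_replicate_succ (n : Nat) (s : String) :
    String.join (List.replicate (n + 1) s) = String.join (List.replicate n s) ++ s := by
  rw [List.replicate_succ, str_join_cons, join_replicate_comm]

theorem addexists_eq_alt (r : List String) (x0 : String) :
    addexists (x0 :: r) =
      String.join ((r.reverse).map (fun x => "(or " ++ x ++ " ")) ++ x0 ++
        String.join (List.replicate r.length " )") := by
  induction r using List.reverseRecOn with
  | nil => rw [addexists]; simp [String.join]
  | append_singleton r y ih =>
      rw [addexists]
      have hlen : (x0 :: (r ++ [y])).length = r.length + 2 := by simp
      have h1 : (((x0 :: (r ++ [y])).length == 0)) = false := by simp [hlen]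
      have h2 : (((x0 :: (r ++ [y])).length == 1)) = false := by simp [hlen]
      simp only [h1, h2, if_false, Bool.false_eq_true]
      have hL : (x0 :: (r ++ [y])).getLast! = y := by
        rw [show x0 :: (r ++ [y]) = (x0 :: r) ++ [y] from rfl]
        simp [List.getLast!]
      have hD : (x0 :: (r ++ [y])).dropLast = x0 :: r := by
        simpa using List.dropLast_concat (l₁ := x0 :: r) (b := y)
      rw [hL, hD, ih]
      simp only [List.reverse_append, List.reverse_cons, List.reverse_nil, List.nil_append,
        List.cons_append, List.map_cons, str_join_cons, List.length_append,
        List.length_cons, List.length_nil]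
      rw [join_replicate_succ]
      simp [String.append_assoc]

-- ===== VERDICT (by name: the statement is the Claim_ definition above) =====
theorem addexists_spec : Claim_equal_addexists := by
  intro a _
  unfold Spec_addexists
  cases a with
  | nil => rw [addexists]; simp [addexists_alt]
  | cons x0 r => rw [addexists_eq_alt]; simp [addexists_alt]
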